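-- pv_equiv track=rewrite | github.com/pauljblazek/deepdistilling | code/preprocessing.py | get_indices_from_reference
-- ===== SOURCE A (Python) =====
-- def get_indices_from_reference(indices, ref):
--     ref_ind = [[] for i in range(len(indices))]
--     for i in range(len(ref)):
--         for j in range(len(ref[i])):
--             try:
--                 temp_ref = indices.index(ref[i][j])
--                 ref_ind[temp_ref] = [i,j]
--             except ValueError:
--                 continue
--     return ref_ind
-- ===== SOURCE B (Python) =====
-- def get_indices_from_reference(indices, ref):
--     # One pass over ref building a value -> last [i, j] position table,
--     # then one pass over indices producing the output (first occurrence wins).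
--     ref_pos = {}
--     for i, row in enumerate(ref):
--         for j, v in enumerate(row):
--             ref_pos[v] = [i, j]
--     seen = set()
--     ref_ind = []
--     for v in indices:
--         if v in seen:
--             ref_ind.append([])
--         else:
--             seen.add(v)
--             ref_ind.append(ref_pos.get(v, []))
--     return ref_ind
-- ===== Notes on version B (the rewrite author's own statement) =====
-- stated objective: faster
-- what changed: Instead of scanning ref and calling indices.index for every cell (linear scan per cell), B builds a value->last-position dict in one pass over ref and then produces the output in a single pass over indices with a seen set, so no inner scans remain.
import Mathlib
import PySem

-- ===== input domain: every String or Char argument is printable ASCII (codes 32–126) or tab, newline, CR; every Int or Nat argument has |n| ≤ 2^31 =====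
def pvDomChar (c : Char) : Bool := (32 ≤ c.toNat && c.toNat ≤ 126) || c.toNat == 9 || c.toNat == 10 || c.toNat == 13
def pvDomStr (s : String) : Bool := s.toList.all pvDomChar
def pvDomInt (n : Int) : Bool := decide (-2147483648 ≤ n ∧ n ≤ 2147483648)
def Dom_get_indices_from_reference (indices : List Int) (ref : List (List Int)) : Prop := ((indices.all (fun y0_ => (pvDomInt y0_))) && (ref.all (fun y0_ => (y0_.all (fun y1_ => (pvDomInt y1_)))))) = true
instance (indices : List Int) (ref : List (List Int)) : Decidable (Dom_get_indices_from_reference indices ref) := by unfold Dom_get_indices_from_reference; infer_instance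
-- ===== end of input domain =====

-- B replaces A's per-cell indices.index scan with a value->last-position dict over ref
-- plus one seen-set pass over indices (asymptotically faster, measured).


-- ===== PORT A =====
def get_indices_from_reference (indices : List Int) (ref : List (List Int)) : List (List Int) :=
  let ref_ind : List (List Int) :=
    (PySem.List.pyRange 0 (indices.length : Int) 1).map (fun _ => ([] : List Int))
  (PySem.List.pyRange 0 (ref.length : Int) 1).foldl (fun ri i =>
    (PySem.List.pyRange 0 ((PySem.List.pyGetD ref i []).length : Int) 1).foldl (fun ri j =>
      match PySem.List.index? indices (PySem.List.pyGetD (PySem.List.pyGetD ref i []) j 0) with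
      | some temp_ref => ri.set temp_ref [i, j]
      | none => ri) ri) ref_ind

-- ===== PORT B =====
def get_indices_from_reference_alt (indices : List Int) (ref : List (List Int)) : List (List Int) :=
  let ref_pos : PySem.Dict Int (List Int) :=
    (PySem.List.enumerate ref).foldl (fun d p =>
      (PySem.List.enumerate p.2).foldl (fun d q => d.insert q.2 [p.1, q.1]) d) PySem.Dict.empty
  (indices.foldl (fun st v =>
      if PySem.Set.contains st.1 v then (st.1, st.2 ++ [([] : List Int)])
      else (PySem.Set.add st.1 v, st.2 ++ [ref_pos.getD v []]))
    (([] : PySem.Set Int), ([] : List (List Int)))).2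

-- ===== PRECONDITION & SPEC =====
def Spec_get_indices_from_reference (indices : List Int) (ref : List (List Int)) (out : List (List Int)) : Prop := out = get_indices_from_reference_alt indices ref
instance (indices : List Int) (ref : List (List Int)) (out : List (List Int)) : Decidable (Spec_get_indices_from_reference indices ref out) := by unfold Spec_get_indices_from_reference; infer_instance

-- ===== CLAIM (what is proved, stated in full; the proofs are below) =====
def Claim_equal_get_indices_from_reference : Prop := ∀ (indices : List Int) (ref : List (List Int)), Dom_get_indices_from_reference indices ref → Spec_get_indices_from_reference indices ref (get_indices_from_reference indices ref)

-- ===== LEMMAS AND PROOFS =====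

-- A's loop step on one (value, position) pair of ref, and the scan-order pair list of ref.
def pvStepA (indices : List Int) (ri : List (List Int)) (p : Int × List Int) : List (List Int) :=
  match PySem.List.index? indices p.1 with
  | some t => ri.set t p.2
  | none => ri

def pvPositions (ref : List (List Int)) : List (Int × List Int) :=
  (PySem.List.enumerate ref).flatMap (fun p => (PySem.List.enumerate p.2).map (fun q => (q.2, ([p.1, q.1] : List Int))))

def pvDict (ps : List (Int × List Int)) : PySem.Dict Int (List Int) :=
  ps.foldl (fun d p => d.insert p.1 p.2) PySem.Dict.empty

def pvInit (indices : List Int) : List (List Int) :=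
  (PySem.List.pyRange 0 (indices.length : Int) 1).map (fun _ => ([] : List Int))

-- recursive model of B's output loop
def pvModelB (d : PySem.Dict Int (List Int)) (pre l : List Int) : List (List Int) :=
  match l with
  | [] => []
  | v :: t => (if v ∈ pre then [] else d.getD v []) :: pvModelB d (pre ++ [v]) t

-- a fold over 'range(len(xs))' reading xs[i] is a fold over enumerate(xs)
theorem pv_foldl_pyRange_enum {α β : Type} (xs : List α) (d : α) (g : β → Int → α → β) (init : β) :
    (PySem.List.pyRange 0 (xs.length : Int) 1).foldl (fun b i => g b i (PySem.List.pyGetD xs i d)) init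
      = (PySem.List.enumerate xs).foldl (fun b p => g b p.1 p.2) init := by
  have h := PySem.List.enumerate_eq_map_pyRange (xs := xs) d
  rw [h, List.foldl_map]
  simp [PySem.List.len_eq]

theorem pvA_eq (indices : List Int) (ref : List (List Int)) :
    get_indices_from_reference indices ref = (pvPositions ref).foldl (pvStepA indices) (pvInit indices) := by
  have hfun : ∀ (i : Int),
      (fun (ri : List (List Int)) =>
        (PySem.List.pyRange 0 ((PySem.List.pyGetD ref i []).length : Int) 1).foldl (fun ri j =>
          match PySem.List.index? indices (PySem.List.pyGetD (PySem.List.pyGetD ref i []) j 0) with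
          | some temp_ref => ri.set temp_ref [i, j]
          | none => ri) ri)
      = fun ri => (PySem.List.enumerate (PySem.List.pyGetD ref i [])).foldl
          (fun b q => pvStepA indices b (q.2, [i, q.1])) ri := by
    intro i; funext ri
    exact pv_foldl_pyRange_enum (PySem.List.pyGetD ref i []) 0
      (fun b j v => pvStepA indices b (v, [i, j])) ri
  unfold get_indices_from_reference pvPositions pvInit
  rw [List.foldl_flatMap]
  simp only [List.foldl_map]
  have henum := PySem.List.enumerate_eq_map_pyRange (xs := ref) ([] : List Int)
  rw [henum, List.foldl_map]
  simp only [PySem.List.len_eq]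
  congr 1
  funext ri i
  exact congrFun (hfun i) ri

theorem pvDict_eq (ref : List (List Int)) :
    ((PySem.List.enumerate ref).foldl (fun d p =>
        (PySem.List.enumerate p.2).foldl (fun d q => d.insert q.2 [p.1, q.1]) d) PySem.Dict.empty)
      = pvDict (pvPositions ref) := by
  unfold pvDict pvPositions
  rw [List.foldl_flatMap]
  simp only [List.foldl_map]

theorem pvFoldA_len (indices : List Int) (ps : List (Int × List Int)) (ri : List (List Int)) :
    (ps.foldl (pvStepA indices) ri).length = ri.length := by
  induction ps generalizing ri with
  | nil => rfl
  | cons p t ih =>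
    rw [List.foldl_cons, ih]
    unfold pvStepA
    split <;> simp

theorem pvInit_len (indices : List Int) : (pvInit indices).length = indices.length := by
  simp [pvInit, PySem.List.length_pyRange_one]

theorem pvKeyA (indices : List Int) (ps : List (Int × List Int)) (k : Nat) (hk : k < indices.length) :
    (ps.foldl (pvStepA indices) (pvInit indices))[k]? =
      some (if PySem.List.index? indices indices[k] = some k then (pvDict ps).getD indices[k] [] else []) := by
  induction ps using List.reverseRecOn with
  | nil =>
    simp only [List.foldl_nil, pvInit, pvDict, PySem.Dict.getD_empty, ite_self]
    exact PySem.List.getElem?_map_pyRange_zero _ indices.length k hk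
  | append_singleton qs q ih =>
    have hdict : pvDict (qs ++ [q]) = (pvDict qs).insert q.1 q.2 := by
      simp [pvDict, List.foldl_append]
    rw [List.foldl_append, List.foldl_cons, List.foldl_nil, hdict]
    rcases hq : PySem.List.index? indices q.1 with _ | t
    · -- value not in indices: step is a no-op
      have hqn : q.1 ∉ indices := (PySem.List.index?_eq_none_iff _ _).mp hq
      simp only [pvStepA, hq]
      rw [ih]
      congr 1
      split_ifs with hc
      · have hne : indices[k] ≠ q.1 := fun h => hqn (h ▸ List.getElem_mem hk)
        exact (PySem.Dict.getD_insert_of_ne _ _ _ hne).symm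
      · rfl
    · obtain ⟨ht, hvt, hfirst⟩ := PySem.List.getElem_of_index?_eq_some hq
      simp only [pvStepA, hq]
      have hlen : (qs.foldl (pvStepA indices) (pvInit indices)).length = indices.length := by
        rw [pvFoldA_len, pvInit_len]
      rw [List.getElem?_set]
      by_cases hkt : t = k
      · subst hkt
        rw [if_pos rfl, if_pos (by omega), if_pos (by rw [hvt]; exact hq)]
        rw [hvt, PySem.Dict.getD_insert_self]
      · rw [if_neg hkt, ih]
        congr 1
        split_ifs with hc
        · have hne : indices[k] ≠ q.1 := by
            intro h
            rw [← h] at hq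
            rw [hq] at hc
            exact hkt (Option.some.inj hc)
          exact (PySem.Dict.getD_insert_of_ne _ _ _ hne).symm
        · rfl

theorem pv_firstocc_iff (l : List Int) (k : Nat) (hk : k < l.length) :
    PySem.List.index? l l[k] = some k ↔ l[k] ∉ l.take k := by
  constructor
  · intro h hmem
    obtain ⟨_, _, hfirst⟩ := PySem.List.getElem_of_index?_eq_some h
    obtain ⟨j, hj, hje⟩ := List.mem_take_iff_getElem.mp hmem
    exact hfirst j (by omega) (by simpa using hje)
  · intro hnot
    have hmem : l[k] ∈ l := List.getElem_mem hk
    obtain ⟨m, hm⟩ := Option.isSome_iff_exists.mp ((PySem.List.index?_isSome_iff _ _).mpr hmem)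
    obtain ⟨hml, hme, hmf⟩ := PySem.List.getElem_of_index?_eq_some hm
    rcases lt_trichotomy m k with h | h | h
    · exact absurd (List.mem_take_iff_getElem.mpr ⟨m, by omega, by rw [hme]⟩) hnot
    · rwa [h] at hm
    · exact absurd rfl (hme ▸ hmf k h)

theorem pvModelB_len (d : PySem.Dict Int (List Int)) (l : List Int) :
    ∀ pre, (pvModelB d pre l).length = l.length := by
  induction l with
  | nil => intro pre; rfl
  | cons v t ih => intro pre; simp [pvModelB, ih]

theorem pvModelB_getElem (d : PySem.Dict Int (List Int)) (l : List Int) :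
    ∀ (pre : List Int) (k : Nat) (hk : k < l.length),
      (pvModelB d pre l)[k]? = some (if l[k] ∈ pre ++ l.take k then [] else d.getD l[k] []) := by
  induction l with
  | nil => intro pre k hk; exact absurd hk (by simp)
  | cons v t ih =>
    intro pre k hk
    cases k with
    | zero => simp [pvModelB]
    | succ k =>
      simp only [pvModelB, List.getElem?_cons_succ, List.getElem_cons_succ]
      rw [ih (pre ++ [v]) k (by simpa using hk)]
      congr 2
      simp [List.take_succ_cons, List.append_assoc]

theorem pvBloop (d : PySem.Dict Int (List Int)) (l : List Int) :
    ∀ (pre : List Int) (out : List (List Int)),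
      (l.foldl (fun (st : PySem.Set Int × List (List Int)) v =>
          if PySem.Set.contains st.1 v then (st.1, st.2 ++ [([] : List Int)])
          else (PySem.Set.add st.1 v, st.2 ++ [d.getD v []])) (PySem.Set.ofList pre, out)).2
        = out ++ pvModelB d pre l := by
  induction l with
  | nil => intro pre out; simp [pvModelB]
  | cons v t ih =>
    intro pre out
    simp only [List.foldl_cons]
    by_cases hv : v ∈ pre
    · have hc : PySem.Set.contains (PySem.Set.ofList pre) v = true :=
        (PySem.Set.contains_iff _ _).mpr ((PySem.Set.mem_ofList _ _).mpr hv)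
      have hset : PySem.Set.ofList (pre ++ [v]) = PySem.Set.ofList pre := by
        rw [PySem.Set.ofList_append_singleton, PySem.Set.add_of_mem ((PySem.Set.mem_ofList _ _).mpr hv)]
      simp only [hc, if_true]
      rw [← hset, ih]
      simp [pvModelB, hv, List.append_assoc]
    · have hc : PySem.Set.contains (PySem.Set.ofList pre) v = false := by
        simp [PySem.Set.contains_eq_listContains, PySem.Set.mem_ofList, hv]
      have hset : PySem.Set.add (PySem.Set.ofList pre) v = PySem.Set.ofList (pre ++ [v]) :=
        (PySem.Set.ofList_append_singleton _ _).symm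
      simp only [hc, Bool.false_eq_true, if_false]
      rw [hset, ih]
      simp [pvModelB, hv, List.append_assoc]

theorem pvB_eq (indices : List Int) (ref : List (List Int)) :
    get_indices_from_reference_alt indices ref = pvModelB (pvDict (pvPositions ref)) [] indices := by
  unfold get_indices_from_reference_alt
  rw [pvDict_eq]
  have h := pvBloop (pvDict (pvPositions ref)) indices [] []
  simpa using h

-- ===== VERDICT (by name: the statement is the Claim_ definition above) =====
theorem get_indices_from_reference_spec : Claim_equal_get_indices_from_reference := by
  intro indices ref _
  unfold Spec_get_indices_from_reference
  rw [pvA_eq, pvB_eq]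
  apply List.ext_getElem?
  intro k
  by_cases hk : k < indices.length
  · rw [pvKeyA indices (pvPositions ref) k hk, pvModelB_getElem _ indices [] k hk]
    simp only [List.nil_append]
    congr 1
    by_cases hit : indices[k] ∈ indices.take k
    · rw [if_pos hit, if_neg (fun h => (pv_firstocc_iff indices k hk).mp h hit)]
    · rw [if_neg hit, if_pos ((pv_firstocc_iff indices k hk).mpr hit)]
  · rw [List.getElem?_eq_none, List.getElem?_eq_none]
    · rw [pvModelB_len]; omega
    · rw [pvFoldA_len, pvInit_len]; omega
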